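-- pv_equiv track=rewrite | github.com/Yovel14/Programing_Questions | CodeForces/A/1374A-Multiply_by_2_divide_by_6.py | FindCount2
-- ===== SOURCE A (Python) =====
-- def FindCount2(n):# slow
--     count3 =0
--     count2 =0
--     while n%3==0:
--         count3+=1
--         n//=3
--
--     while n%2==0:
--         count2+=1
--         n//=2
--     if n!=1 or count2>count3:
--         return -1
--     return count2+2*(count3-count2)
-- ===== SOURCE B (Python) =====
-- def FindCount2(n):
--     count = 0
--     while n != 1:
--         if n % 6 == 0:
--             n //= 6
--         elif n % 3 == 0:
--             n *= 2
--         else: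
--             return -1
--         count += 1
--     return count
-- ===== Notes on version B (the rewrite author's own statement) =====
-- stated objective: simpler
-- what changed: B replaces A's factor-then-closed-form approach (strip all 3s, strip all 2s, check residual=1 and count2<=count3, return count2+2*(count3-count2)) with a single greedy simulation loop that divides by 6 when possible, otherwise multiplies by 3-divisible n by 2, counting each operation directly.
import Mathlib
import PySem

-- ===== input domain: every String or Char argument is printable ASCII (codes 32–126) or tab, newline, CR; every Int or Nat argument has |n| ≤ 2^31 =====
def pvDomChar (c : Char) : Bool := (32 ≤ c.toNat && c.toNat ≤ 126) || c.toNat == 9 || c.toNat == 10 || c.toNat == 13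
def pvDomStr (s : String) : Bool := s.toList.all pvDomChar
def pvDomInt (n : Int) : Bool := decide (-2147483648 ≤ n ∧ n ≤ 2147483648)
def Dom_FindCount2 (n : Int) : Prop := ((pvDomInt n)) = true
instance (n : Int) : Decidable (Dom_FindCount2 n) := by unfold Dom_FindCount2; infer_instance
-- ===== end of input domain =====

-- B replaces A's factor-counting-plus-closed-form with a single greedy simulation loop
-- (divide by 6 when possible, else double a 3-divisible n), one op counter; same cost, simpler.

-- ===== PORT A =====
-- A's `while n%3==0: count3+=1; n//=3` loop; fuel is a totality guard only: FindCount2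
-- supplies fuel n.natAbs, proved sufficient for every n ≠ 0 below (the Python loop never
-- exits at n = 0, which is outside Pre_FindCount2).  Divisors are the positive literals 3/2,
-- where Lean's Int `/`/`%` coincide with Python's `//`/`%`.
def loopA3 (fuel : Nat) (n c : Int) : Int × Int :=
  match fuel with
  | 0 => (n, c)
  | f + 1 => if n % 3 = 0 then loopA3 f (n / 3) (c + 1) else (n, c)

-- A's `while n%2==0: count2+=1; n//=2` loop; same fuel guard.
def loopA2 (fuel : Nat) (n c : Int) : Int × Int :=
  match fuel with
  | 0 => (n, c)
  | f + 1 => if n % 2 = 0 then loopA2 f (n / 2) (c + 1) else (n, c)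

def FindCount2 (n : Int) : Int :=
  let p3 := loopA3 n.natAbs n 0
  let p2 := loopA2 p3.1.natAbs p3.1 0
  if p2.1 ≠ 1 ∨ p2.2 > p3.2 then -1 else p2.2 + 2 * (p3.2 - p2.2)

-- ===== PORT B =====
-- B's `while n != 1` greedy loop, with fuel as a totality guard; FindCount2_alt supplies
-- fuel 2*|n|+2, proved sufficient below (the 0-fuel value is never reached when n ≠ 0;
-- B's Python loops forever only at n = 0, outside Pre_FindCount2).
def loopB (fuel : Nat) (n c : Int) : Int :=
  match fuel with
  | 0 => -1
  | fuel + 1 =>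
    if n = 1 then c
    else if n % 6 = 0 then loopB fuel (n / 6) (c + 1)
    else if n % 3 = 0 then loopB fuel (2 * n) (c + 1)
    else -1

def FindCount2_alt (n : Int) : Int := loopB (2 * n.natAbs + 2) n 0

-- ===== PRECONDITION & SPEC =====
-- Pre_ excludes exactly n = 0: there both Python programs loop forever (0 % 3 == 0 and
-- 0 // 3 == 0 for A; 0 % 6 == 0 and 0 // 6 == 0 for B), so neither returns.
def Pre_FindCount2 (n : Int) : Prop := n ≠ 0
instance (n : Int) : Decidable (Pre_FindCount2 n) := by unfold Pre_FindCount2; infer_instance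
def pvWitness_FindCount2 : Int := 12

def Spec_FindCount2 (n : Int) (out : Int) : Prop := out = FindCount2_alt n
instance (n : Int) (out : Int) : Decidable (Spec_FindCount2 n out) := by unfold Spec_FindCount2; infer_instance

-- ===== CLAIM (what is proved, stated in full; the proofs are below) =====
def Claim_equal_FindCount2 : Prop := ∀ (n : Int), Dom_FindCount2 n → Pre_FindCount2 n → Spec_FindCount2 n (FindCount2 n)

-- ===== LEMMAS AND PROOFS =====

-- fuel-free (well-founded) versions of A's two loops, used only by the proofs
def iterA3 (n c : Int) : Int × Int :=
  if h : n % 3 = 0 ∧ n ≠ 0 then iterA3 (n / 3) (c + 1) else (n, c)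
termination_by n.natAbs
decreasing_by omega

def iterA2 (n c : Int) : Int × Int :=
  if h : n % 2 = 0 ∧ n ≠ 0 then iterA2 (n / 2) (c + 1) else (n, c)
termination_by n.natAbs
decreasing_by omega

-- A's result computed with the fuel-free loops
def FindCount2I (n : Int) : Int :=
  let p3 := iterA3 n 0
  let p2 := iterA2 p3.1 0
  if p2.1 ≠ 1 ∨ p2.2 > p3.2 then -1 else p2.2 + 2 * (p3.2 - p2.2)

-- unfolding equations
lemma iterA3_pos (n c : Int) (h : n % 3 = 0 ∧ n ≠ 0) :
    iterA3 n c = iterA3 (n / 3) (c + 1) := by rw [iterA3]; rw [dif_pos h]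

lemma iterA3_neg (n c : Int) (h : ¬ (n % 3 = 0 ∧ n ≠ 0)) :
    iterA3 n c = (n, c) := by rw [iterA3]; rw [dif_neg h]

lemma iterA2_pos (n c : Int) (h : n % 2 = 0 ∧ n ≠ 0) :
    iterA2 n c = iterA2 (n / 2) (c + 1) := by rw [iterA2]; rw [dif_pos h]

lemma iterA2_neg (n c : Int) (h : ¬ (n % 2 = 0 ∧ n ≠ 0)) :
    iterA2 n c = (n, c) := by rw [iterA2]; rw [dif_neg h]

-- the fuel the ports supply is sufficient: fuelled loops agree with the fuel-free ones
lemma loopA3_suff (f : Nat) : ∀ n c : Int, n ≠ 0 → n.natAbs ≤ f → loopA3 f n c = iterA3 n c := by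
  induction f with
  | zero => intro n c hn hf; omega
  | succ f ih =>
    intro n c hn hf
    show (if n % 3 = 0 then loopA3 f (n / 3) (c + 1) else (n, c)) = _
    by_cases h : n % 3 = 0
    · rw [if_pos h, iterA3_pos n c ⟨h, hn⟩]
      exact ih (n / 3) (c + 1) (by omega) (by omega)
    · rw [if_neg h, iterA3_neg n c (by omega)]

lemma loopA2_suff (f : Nat) : ∀ n c : Int, n ≠ 0 → n.natAbs ≤ f → loopA2 f n c = iterA2 n c := by
  induction f with
  | zero => intro n c hn hf; omega
  | succ f ih =>
    intro n c hn hf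
    show (if n % 2 = 0 then loopA2 f (n / 2) (c + 1) else (n, c)) = _
    by_cases h : n % 2 = 0
    · rw [if_pos h, iterA2_pos n c ⟨h, hn⟩]
      exact ih (n / 2) (c + 1) (by omega) (by omega)
    · rw [if_neg h, iterA2_neg n c (by omega)]

-- count-shift laws
lemma iterA3_shift (m : Nat) : ∀ n c : Int, n.natAbs = m →
    iterA3 n c = ((iterA3 n 0).1, c + (iterA3 n 0).2) := by
  induction m using Nat.strong_induction_on with
  | _ m ih =>
    intro n c hm
    by_cases h : n % 3 = 0 ∧ n ≠ 0
    · rw [iterA3_pos n c h, iterA3_pos n 0 h]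
      have hlt : (n / 3).natAbs < m := by omega
      rw [ih _ hlt (n / 3) (c + 1) rfl, ih _ hlt (n / 3) (0 + 1) rfl]
      simp; omega
    · rw [iterA3_neg n c h, iterA3_neg n 0 h]; simp

lemma iterA2_shift (m : Nat) : ∀ n c : Int, n.natAbs = m →
    iterA2 n c = ((iterA2 n 0).1, c + (iterA2 n 0).2) := by
  induction m using Nat.strong_induction_on with
  | _ m ih =>
    intro n c hm
    by_cases h : n % 2 = 0 ∧ n ≠ 0
    · rw [iterA2_pos n c h, iterA2_pos n 0 h]
      have hlt : (n / 2).natAbs < m := by omega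
      rw [ih _ hlt (n / 2) (c + 1) rfl, ih _ hlt (n / 2) (0 + 1) rfl]
      simp; omega
    · rw [iterA2_neg n c h, iterA2_neg n 0 h]; simp

-- counters never decrease
lemma iterA2_count_ge (m : Nat) : ∀ n c : Int, n.natAbs = m → c ≤ (iterA2 n c).2 := by
  induction m using Nat.strong_induction_on with
  | _ m ih =>
    intro n c hm
    by_cases h : n % 2 = 0 ∧ n ≠ 0
    · rw [iterA2_pos n c h]
      have := ih (n / 2).natAbs (by omega) (n / 2) (c + 1) rfl
      omega
    · rw [iterA2_neg n c h]

lemma iterA3_count_ge (m : Nat) : ∀ n c : Int, n.natAbs = m → c ≤ (iterA3 n c).2 := by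
  induction m using Nat.strong_induction_on with
  | _ m ih =>
    intro n c hm
    by_cases h : n % 3 = 0 ∧ n ≠ 0
    · rw [iterA3_pos n c h]
      have := ih (n / 3).natAbs (by omega) (n / 3) (c + 1) rfl
      omega
    · rw [iterA3_neg n c h]

-- exit-state facts about iterA3
lemma iterA3_exit (m : Nat) : ∀ n c : Int, n.natAbs = m → n ≠ 0 →
    (iterA3 n c).1 ≠ 0 ∧ (iterA3 n c).1 % 3 ≠ 0 ∧
    (n % 2 ≠ 0 → (iterA3 n c).1 % 2 ≠ 0) := by
  induction m using Nat.strong_induction_on with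
  | _ m ih =>
    intro n c hm hn
    by_cases h : n % 3 = 0 ∧ n ≠ 0
    · rw [iterA3_pos n c h]
      have hlt : (n / 3).natAbs < m := by omega
      have h0 : n / 3 ≠ 0 := by omega
      have := ih _ hlt (n / 3) (c + 1) rfl h0
      exact ⟨this.1, this.2.1, fun hodd => this.2.2 (by omega)⟩
    · rw [iterA3_neg n c h]
      exact ⟨hn, by omega, fun h2 => h2⟩

-- doubling law for iterA3
lemma iterA3_double (m : Nat) : ∀ n c : Int, n.natAbs = m →
    iterA3 (2 * n) c = (2 * (iterA3 n c).1, (iterA3 n c).2) := by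
  induction m using Nat.strong_induction_on with
  | _ m ih =>
    intro n c hm
    by_cases h : n % 3 = 0 ∧ n ≠ 0
    · have h2 : (2 * n) % 3 = 0 ∧ 2 * n ≠ 0 := by omega
      rw [iterA3_pos n c h, iterA3_pos (2 * n) c h2]
      have hdiv : 2 * n / 3 = 2 * (n / 3) := by omega
      rw [hdiv]
      exact ih _ (by omega) (n / 3) (c + 1) rfl
    · have h2 : ¬ ((2 * n) % 3 = 0 ∧ 2 * n ≠ 0) := by omega
      rw [iterA3_neg n c h, iterA3_neg (2 * n) c h2]

-- the fuelled port equals the fuel-free computation on n ≠ 0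
lemma A_eq_ideal (n : Int) (hn : n ≠ 0) : FindCount2 n = FindCount2I n := by
  have h3 : loopA3 n.natAbs n 0 = iterA3 n 0 := loopA3_suff _ n 0 hn le_rfl
  have hnz : (iterA3 n 0).1 ≠ 0 := (iterA3_exit _ n 0 rfl hn).1
  have h2 : loopA2 (iterA3 n 0).1.natAbs (iterA3 n 0).1 0 = iterA2 (iterA3 n 0).1 0 :=
    loopA2_suff _ _ 0 hnz le_rfl
  simp only [FindCount2, FindCount2I, h3, h2]

-- A's step laws (on the fuel-free form)
lemma A_step_div6 (n : Int) (hn : n ≠ 0) (h6 : n % 6 = 0) :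
    FindCount2I n = (if FindCount2I (n / 6) = -1 then -1 else FindCount2I (n / 6) + 1) := by
  obtain ⟨k, hk⟩ : ∃ k, n = 6 * k := ⟨n / 6, by omega⟩
  subst hk
  have hk0 : k ≠ 0 := by omega
  have hd6 : 6 * k / 6 = k := by omega
  rw [hd6]
  have hrw : (6 : Int) * k = 2 * (3 * k) := by ring
  have hd : iterA3 (6 * k) 0 = (2 * (iterA3 (3 * k) 0).1, (iterA3 (3 * k) 0).2) := by
    rw [hrw]; exact iterA3_double _ _ 0 rfl
  have hs : iterA3 (3 * k) 0 = ((iterA3 k 0).1, 1 + (iterA3 k 0).2) := by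
    rw [iterA3_pos _ 0 (by omega : (3 : Int) * k % 3 = 0 ∧ 3 * k ≠ 0)]
    have h33 : 3 * k / 3 = k := by omega
    rw [h33]
    exact iterA3_shift _ _ _ rfl
  have hm0 : (iterA3 k 0).1 ≠ 0 := (iterA3_exit _ k 0 rfl hk0).1
  have ha : iterA2 (2 * (iterA3 k 0).1) 0
      = ((iterA2 (iterA3 k 0).1 0).1, 1 + (iterA2 (iterA3 k 0).1 0).2) := by
    rw [iterA2_pos _ 0 (by omega : (2 * (iterA3 k 0).1) % 2 = 0 ∧ 2 * (iterA3 k 0).1 ≠ 0)]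
    have h22 : 2 * (iterA3 k 0).1 / 2 = (iterA3 k 0).1 := by omega
    rw [h22]
    exact iterA2_shift _ _ _ rfl
  have ha0 : (0 : Int) ≤ (iterA2 (iterA3 k 0).1 0).2 := iterA2_count_ge _ _ 0 rfl
  have hb0 : (0 : Int) ≤ (iterA3 k 0).2 := iterA3_count_ge _ _ 0 rfl
  simp only [FindCount2I, hd, hs, ha]
  split_ifs <;> omega

lemma A_step_double (n : Int) (hn : n ≠ 0) (h3 : n % 3 = 0) (h2 : n % 2 ≠ 0) :
    FindCount2I n = (if FindCount2I (2 * n) = -1 then -1 else FindCount2I (2 * n) + 1) := by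
  have hex := iterA3_exit _ n 0 rfl hn
  have hodd : (iterA3 n 0).1 % 2 ≠ 0 := hex.2.2 h2
  have hb : 1 ≤ (iterA3 n 0).2 := by
    rw [iterA3_pos n 0 ⟨h3, hn⟩]
    have := iterA3_count_ge _ (n / 3) (0 + 1) rfl
    omega
  have hd : iterA3 (2 * n) 0 = (2 * (iterA3 n 0).1, (iterA3 n 0).2) :=
    iterA3_double _ n 0 rfl
  have ha1 : iterA2 (iterA3 n 0).1 0 = ((iterA3 n 0).1, 0) :=
    iterA2_neg _ 0 (by omega)
  have ha2 : iterA2 (2 * (iterA3 n 0).1) 0 = ((iterA3 n 0).1, 0 + 1) := by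
    rw [iterA2_pos _ 0 (by omega : (2 * (iterA3 n 0).1) % 2 = 0 ∧ 2 * (iterA3 n 0).1 ≠ 0)]
    have h22 : 2 * (iterA3 n 0).1 / 2 = (iterA3 n 0).1 := by omega
    rw [h22]
    exact iterA2_neg _ (0 + 1) (by omega)
  simp only [FindCount2I, hd, ha1, ha2]
  split_ifs <;> omega

lemma A_step_stuck (n : Int) (h3 : n % 3 ≠ 0) (h1 : n ≠ 1) : FindCount2I n = -1 := by
  have hn : n ≠ 0 := by omega
  have hb : iterA3 n 0 = (n, 0) := iterA3_neg n 0 (by omega)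
  simp only [FindCount2I, hb]
  by_cases h2 : n % 2 = 0
  · rw [iterA2_pos n 0 ⟨h2, hn⟩]
    have := iterA2_count_ge _ (n / 2) (0 + 1) rfl
    rw [if_pos (by omega)]
  · rw [iterA2_neg n 0 (by omega)]
    rw [if_pos (by simp [h1])]

lemma A_one : FindCount2I 1 = 0 := by
  have h3 : iterA3 1 0 = (1, 0) := iterA3_neg 1 0 (by omega)
  have h2 : iterA2 1 0 = (1, 0) := iterA2_neg 1 0 (by omega)
  simp [FindCount2I, h3, h2]

-- fuel measure for B's loop
def cnt3 (m : Nat) : Nat :=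
  if h : m % 3 = 0 ∧ m ≠ 0 then cnt3 (m / 3) + 1 else 0
termination_by m
decreasing_by omega

def mu (n : Int) : Nat := 2 * cnt3 n.natAbs + (if n % 2 = 0 then 0 else 1)

lemma cnt3_le (m : Nat) : cnt3 m ≤ m := by
  induction m using Nat.strong_induction_on with
  | _ m ih =>
    rw [cnt3]
    split
    · next h => have := ih (m / 3) (by omega); omega
    · omega

lemma cnt3_two_mul (m : Nat) : cnt3 (2 * m) = cnt3 m := by
  induction m using Nat.strong_induction_on with
  | _ m ih =>
    by_cases h : m % 3 = 0 ∧ m ≠ 0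
    · conv_lhs => rw [cnt3]
      conv_rhs => rw [cnt3]
      rw [dif_pos (by omega : (2 * m) % 3 = 0 ∧ 2 * m ≠ 0), dif_pos h]
      have hdiv : 2 * m / 3 = 2 * (m / 3) := by omega
      rw [hdiv, ih (m / 3) (by omega)]
    · conv_lhs => rw [cnt3]
      conv_rhs => rw [cnt3]
      rw [dif_neg (by omega : ¬ ((2 * m) % 3 = 0 ∧ 2 * m ≠ 0)), dif_neg h]

lemma cnt3_three_mul (m : Nat) (hm : m ≠ 0) : cnt3 (3 * m) = cnt3 m + 1 := by
  rw [cnt3]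
  rw [dif_pos (by omega : (3 * m) % 3 = 0 ∧ 3 * m ≠ 0)]
  have : 3 * m / 3 = m := by omega
  rw [this]

lemma mu_div6 (n : Int) (hn : n ≠ 0) (h6 : n % 6 = 0) : mu (n / 6) < mu n := by
  have h1 : n.natAbs = 2 * (3 * (n / 6).natAbs) := by omega
  unfold mu
  rw [h1, cnt3_two_mul, cnt3_three_mul _ (by omega)]
  have h2 : n % 2 = 0 := by omega
  rw [if_pos h2]
  split <;> omega

lemma mu_double (n : Int) (h3 : n % 3 = 0) (h2 : n % 2 ≠ 0) : mu (2 * n) < mu n := by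
  unfold mu
  have h1 : (2 * n).natAbs = 2 * n.natAbs := by omega
  rw [h1, cnt3_two_mul]
  rw [if_pos (by omega : (2 * n) % 2 = 0), if_neg h2]
  omega

lemma mu_lt_fuel (n : Int) : mu n < 2 * n.natAbs + 2 := by
  unfold mu
  have := cnt3_le n.natAbs
  split <;> omega

-- A's result is -1 or nonnegative
lemma A_nonneg (n : Int) : FindCount2I n = -1 ∨ 0 ≤ FindCount2I n := by
  have ha := iterA2_count_ge _ (iterA3 n 0).1 0 rfl
  simp only [FindCount2I]
  split_ifs with h
  · left; rfl
  · right; omega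

-- the main simulation lemma: B's loop computes A's value (shifted by the counter)
lemma loopB_eq (fuel : Nat) : ∀ n c : Int, n ≠ 0 → mu n < fuel →
    loopB fuel n c = (if FindCount2I n = -1 then -1 else c + FindCount2I n) := by
  induction fuel with
  | zero => intro n c _ h; omega
  | succ f ih =>
    intro n c hn hf
    show (if n = 1 then c
      else if n % 6 = 0 then loopB f (n / 6) (c + 1)
      else if n % 3 = 0 then loopB f (2 * n) (c + 1)
      else -1) = _
    by_cases h1 : n = 1
    · subst h1
      rw [if_pos rfl, A_one]
      norm_num
    · rw [if_neg h1]
      by_cases h6 : n % 6 = 0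
      · rw [if_pos h6]
        have hk : n / 6 ≠ 0 := by omega
        have hmu : mu (n / 6) < f := by have := mu_div6 n hn h6; omega
        rw [ih (n / 6) (c + 1) hk hmu, A_step_div6 n hn h6]
        have := A_nonneg (n / 6)
        split_ifs <;> omega
      · rw [if_neg h6]
        by_cases h3 : n % 3 = 0
        · rw [if_pos h3]
          have h2 : n % 2 ≠ 0 := by omega
          have hmu : mu (2 * n) < f := by have := mu_double n h3 h2; omega
          rw [ih (2 * n) (c + 1) (by omega) hmu, A_step_double n hn h3 h2]
          have := A_nonneg (2 * n)
          split_ifs <;> omega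
        · rw [if_neg h3, A_step_stuck n h3 h1]
          simp

-- ===== VERDICT (by name: the statement is the Claim_ definition above) =====
theorem FindCount2_spec : Claim_equal_FindCount2 := by
  intro n _ hpre
  unfold Spec_FindCount2 FindCount2_alt
  rw [loopB_eq _ n 0 hpre (mu_lt_fuel n), A_eq_ideal n hpre]
  split_ifs with h
  · exact h
  · omega
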